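-- pv_equiv track=rewrite | github.com/zejacobi/ProjectEuler | Solutions/0051.py | generate_families
-- ===== SOURCE A (Python) =====
-- def generate_families(n):
--     families = []
--     n = str(n)
--     observed = [0, 0, 0, 0, 0, 0, 0, 0, 0, 0]
--     for i in str(n):
--         observed[int(i)] += 1
--
--     for digit, existed in enumerate(observed):
--         if existed == 1:
--             families.append(n.replace(str(digit), '*'))
--         elif existed > 1:
--             # ugh this isn't elegant, but at least n is small
--             we_care_about = str(digit)
--             combinations = [n]
--             for index, original in enumerate(n):
--                 if original == we_care_about:
--                     for combo in combinations[:]: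
--                         combinations.append(combo[:index] + '*' + combo[index + 1:])
--             families += [combo for combo in combinations if '*' in combo]
--
--     return families
-- ===== SOURCE B (Python) =====
-- def generate_families(n):
--     s = str(n)
--     families = []
--     for d in '0123456789':
--         positions = [i for i, c in enumerate(s) if c == d]
--         k = len(positions)
--         for mask in range(1, 2 ** k):
--             chars = list(s)
--             for j in range(k):
--                 if (mask >> j) & 1:
--                     chars[positions[j]] = '*'
--             families.append(''.join(chars))
--     return families
-- ===== Notes on version B (the rewrite author's own statement) =====
-- stated objective: simpler
-- what changed: A's two special-cased branches (str.replace for a unique digit and an in-place list-doubling of slice-spliced copies for repeated digits) are unified into a single pass that collects each digit's occurrence positions once and enumerates bitmasks 1..2^k-1, starring the positions of the set bits (first occurrence = least-significant bit, which reproduces A's doubling order exactly).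
import Mathlib
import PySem

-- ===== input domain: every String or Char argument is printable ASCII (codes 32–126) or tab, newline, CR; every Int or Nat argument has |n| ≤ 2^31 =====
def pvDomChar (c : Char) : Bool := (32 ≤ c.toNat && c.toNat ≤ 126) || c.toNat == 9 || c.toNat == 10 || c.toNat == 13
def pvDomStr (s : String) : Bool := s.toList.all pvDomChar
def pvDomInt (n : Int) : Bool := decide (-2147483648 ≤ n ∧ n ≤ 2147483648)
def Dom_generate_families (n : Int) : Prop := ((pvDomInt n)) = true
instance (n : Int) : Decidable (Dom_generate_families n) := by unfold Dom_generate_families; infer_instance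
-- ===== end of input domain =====

-- B replaces A's two-branch (replace / list-doubling) family generation by a single
-- bitmask enumeration over the occurrence positions of each digit (objective: simpler).
-- ===== PORT A =====
-- combo[:index] + '*' + combo[index + 1:]
def gfStamp (index : Int) (combo : List Char) : List Char :=
  PySem.List.slice combo none (some index) ++ '*' :: PySem.List.slice combo (some (index + 1)) none

-- observed = [0]*10; for i in str(n): observed[int(i)] += 1   (none where int(i) raises ValueError)
def gfObserved (s : List Char) : Option (List Int) :=
  s.foldl (fun obs c => obs.bind fun o =>
      (PySem.Int.ofChars? [c]).map fun d => o.set d.toNat (o.getD d.toNat 0 + 1))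
    (some [0, 0, 0, 0, 0, 0, 0, 0, 0, 0])

-- the body of `for digit, existed in enumerate(observed)`
def gfStep (s : List Char) (fams : List String) (de : Int × Int) : List String :=
  if de.2 = 1 then
    fams ++ [String.ofList (PySem.Chars.replace s (PySem.Int.toChars de.1) ['*'])]
  else if de.2 > 1 then
    let wca := PySem.Int.toChars de.1
    let combos := (PySem.List.enumerate s 0).foldl
      (fun combos io => if [io.2] = wca then combos ++ combos.map (gfStamp io.1) else combos) [s]
    fams ++ (combos.filter (fun combo => PySem.Chars.isIn ['*'] combo)).map String.ofList
  else fams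

def generate_families (n : Int) : List String :=
  let s := PySem.Int.toChars n
  match gfObserved s with
  | none => []   -- `int(i)` raised ValueError ('-' of a negative n); excluded by Pre_
  | some observed => (PySem.List.enumerate observed 0).foldl (gfStep s) []

-- ===== PORT B =====
-- chars = list(s); for j in range(k): if (mask >> j) & 1: chars[positions[j]] = '*'
def gfaStamp (s : List Char) (positions : List Int) (mask : Nat) : List Char :=
  (List.range positions.length).foldl
    (fun cs j => if (mask >>> j) &&& 1 = 1 then cs.set (positions.getD j 0).toNat '*' else cs) s

-- the body of `for d in '0123456789'`
def gfaStep (s : List Char) (fams : List String) (d : Char) : List String :=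
  let positions := ((PySem.List.enumerate s 0).filter (fun ic => ic.2 == d)).map (·.1)
  let k := positions.length
  fams ++ (List.range' 1 (2 ^ k - 1)).map (fun mask => String.ofList (gfaStamp s positions mask))

def generate_families_alt (n : Int) : List String :=
  let s := PySem.Int.toChars n
  ['0', '1', '2', '3', '4', '5', '6', '7', '8', '9'].foldl (gfaStep s) []

-- ===== PRECONDITION & SPEC =====
-- A raises ValueError on negative n (int('-')); Pre_ keeps exactly the inputs where A returns.
def Pre_generate_families (n : Int) : Prop := 0 ≤ n
instance (n : Int) : Decidable (Pre_generate_families n) := by unfold Pre_generate_families; infer_instance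
def pvWitness_generate_families : Int := 13

def Spec_generate_families (n : Int) (out : List String) : Prop := out = generate_families_alt n
instance (n : Int) (out : List String) : Decidable (Spec_generate_families n out) := by unfold Spec_generate_families; infer_instance

-- ===== CLAIM (what is proved, stated in full; the proofs are below) =====
def Claim_equal_generate_families : Prop := ∀ (n : Int), Dom_generate_families n → Pre_generate_families n → Spec_generate_families n (generate_families n)

-- ===== LEMMAS AND PROOFS =====
def pvDigits : List Char := ['0', '1', '2', '3', '4', '5', '6', '7', '8', '9']

-- the positions of d in s as B computes them, with the enumerate start generalized
def posnsFrom (s : List Char) (d : Char) (k : Int) : List Int :=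
  ((PySem.List.enumerate s k).filter (fun ic => ic.2 == d)).map (·.1)

theorem posnsFrom_cons (c : Char) (t : List Char) (d : Char) (k : Int) :
    posnsFrom (c :: t) d k = (if c = d then [k] else []) ++ posnsFrom t d (k + 1) := by
  simp only [posnsFrom, PySem.List.enumerate_cons, List.filter_cons]
  by_cases h : c = d <;> simp [h]

theorem posnsFrom_length (s : List Char) (d : Char) (k : Int) :
    (posnsFrom s d k).length = s.count d := by
  induction s generalizing k with
  | nil => simp [posnsFrom, PySem.List.enumerate]
  | cons c t ih =>
    rw [posnsFrom_cons]
    by_cases h : c = d <;> simp [h, ih]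

theorem posnsFrom_bounds (s : List Char) (d : Char) (k : Int) :
    ∀ p ∈ posnsFrom s d k, k ≤ p ∧ p < k + s.length := by
  induction s generalizing k with
  | nil => simp [posnsFrom, PySem.List.enumerate]
  | cons c t ih =>
    rw [posnsFrom_cons]
    intro p hp
    rcases List.mem_append.1 hp with h | h
    · by_cases hc : c = d
      · simp [hc] at h; subst h; simp
      · simp [hc] at h
    · have := ih (k + 1) p h
      simp only [List.length_cons] at *
      omega

theorem map_noop (d : Char) (t : List Char) (hnot : d ∉ t) :
    t.map (fun c => if c = d then '*' else c) = t := by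
  induction t with
  | nil => simp
  | cons x xs ihx =>
    simp only [List.mem_cons, not_or] at hnot
    simp only [List.map_cons, ihx hnot.2, List.cons.injEq, and_true]
    simp only [ite_eq_right_iff]
    intro hxd; exact absurd hxd.symm hnot.1

theorem map_eq_set_of_posns_single (s : List Char) (d : Char) (k p : Int)
    (h : posnsFrom s d k = [p]) :
    s.map (fun c => if c = d then '*' else c) = s.set (p - k).toNat '*' := by
  induction s generalizing k with
  | nil => simp
  | cons c t ih =>
    rw [posnsFrom_cons] at h
    by_cases hc : c = d
    · simp [hc] at h
      have hcnt : t.count d = 0 := by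
        have := posnsFrom_length t d (k + 1)
        rw [h.2] at this; simpa using this.symm
      have hnot : d ∉ t := by simpa using List.count_eq_zero.1 hcnt
      have hmap := map_noop d t hnot
      subst hc
      rw [h.1]
      simp [hmap]
    · simp [hc] at h
      have hb := posnsFrom_bounds t d (k + 1) p (by rw [h]; simp)
      have hk : (p - k).toNat = (p - (k + 1)).toNat + 1 := by omega
      rw [hk]
      simp [hc, ih (k + 1) h]


theorem replace_go_single (a b : Char) (l acc : List Char) (fuel : Nat) (hf : l.length ≤ fuel) :
    PySem.Chars.replace.go [a] [b] fuel l acc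
      = acc.reverse ++ l.map (fun c => if c = a then b else c) := by
  induction l generalizing fuel acc with
  | nil => cases fuel <;> simp [PySem.Chars.replace.go]
  | cons c t ih =>
    cases fuel with
    | zero => simp at hf
    | succ f =>
      simp only [PySem.Chars.replace.go]
      by_cases h : c = a
      · have hp : [a].isPrefixOf (c :: t) = true := by simp [List.isPrefixOf, h]
        rw [if_pos hp]
        simp only [List.length_cons] at hf
        simp only [List.length_singleton, List.drop_succ_cons, List.drop_zero,
          List.reverse_singleton, List.singleton_append]
        rw [ih (b :: acc) f (by omega)]
        simp [h]
      · have hp : [a].isPrefixOf (c :: t) = false := by simp [List.isPrefixOf]; exact fun he => absurd he.symm h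
        rw [if_neg (by simp [hp])]
        simp only [List.length_cons] at hf
        rw [ih (c :: acc) f (by omega)]
        simp [h]

theorem replace_single (s : List Char) (a b : Char) :
    PySem.Chars.replace s [a] [b] = s.map (fun c => if c = a then b else c) := by
  simp only [PySem.Chars.replace]
  rw [if_neg (by simp)]
  simpa using replace_go_single a b s [] s.length le_rfl

theorem mem_set_self {cs : List Char} {nn : Nat} (h : nn < cs.length) (a : Char) :
    a ∈ cs.set nn a := by
  rw [List.set_eq_take_cons_drop a h]; simp

theorem star_mem_set {cs : List Char} (h : '*' ∈ cs) (nn : Nat) : '*' ∈ cs.set nn '*' := by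
  by_cases hl : nn < cs.length
  · exact mem_set_self hl '*'
  · rw [List.set_eq_of_length_le (by omega)]; exact h

theorem foldl_filter_map {α β γ : Type} (p : α → Bool) (f : α → β) (g : γ → β → γ) :
    ∀ (l : List α) (a : γ),
      l.foldl (fun acc x => if p x then g acc (f x) else acc) a
        = ((l.filter p).map f).foldl g a := by
  intro l
  induction l with
  | nil => simp
  | cons x t ih =>
    intro a
    by_cases h : p x <;> simp [h, ih]

theorem foldl_set_length (step : List Char → Nat → List Char)
    (hstep : ∀ cs j, (step cs j).length = cs.length) :
    ∀ (l : List Nat) (cs : List Char), (l.foldl step cs).length = cs.length := by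
  intro l
  induction l with
  | nil => simp
  | cons j t ih => intro cs; simp [ih, hstep]

theorem gfaStamp_length (s : List Char) (ps : List Int) (m : Nat) :
    (gfaStamp s ps m).length = s.length := by
  apply foldl_set_length
  intro cs j
  split <;> simp

theorem gfaStamp_zero (s : List Char) (ps : List Int) : gfaStamp s ps 0 = s := by
  unfold gfaStamp
  rw [PySem.List.foldl_congr_mem _ _ (fun cs _ => cs) s (by intro acc x _; simp)]
  induction (List.range ps.length) with
  | nil => rfl
  | cons a t ih => simp [ih]

theorem gfaStamp_congr_bits (s : List Char) (ps : List Int) (m m' : Nat)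
    (h : ∀ i < ps.length, (m >>> i) &&& 1 = (m' >>> i) &&& 1) :
    gfaStamp s ps m = gfaStamp s ps m' := by
  unfold gfaStamp
  apply PySem.List.foldl_congr_mem
  intro acc j hj
  rw [h j (List.mem_range.1 hj)]

theorem gfaStamp_append (s : List Char) (qs : List Int) (p : Int) (m : Nat) :
    gfaStamp s (qs ++ [p]) m
      = if (m >>> qs.length) &&& 1 = 1 then (gfaStamp s qs m).set p.toNat '*'
        else gfaStamp s qs m := by
  unfold gfaStamp
  rw [List.length_append, List.length_singleton, List.range_succ, List.foldl_append]
  rw [PySem.List.foldl_congr_mem _ _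
    (fun cs j => if (m >>> j) &&& 1 = 1 then cs.set (qs.getD j 0).toNat '*' else cs) s
    (by intro acc j hj
        have hjl : j < qs.length := List.mem_range.1 hj
        rw [List.getD_append _ _ _ _ hjl])]
  simp only [List.foldl_cons, List.foldl_nil]
  have : (qs ++ [p]).getD qs.length 0 = p := by
    rw [List.getD_append_right _ _ _ _ le_rfl]; simp
  rw [this]

theorem exists_bit : ∀ (k m : Nat), m ≠ 0 → m < 2 ^ k → ∃ j < k, (m >>> j) &&& 1 = 1 := by
  intro k
  induction k with
  | zero => intro m h0 hlt; omega
  | succ k ih =>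
    intro m h0 hlt
    by_cases hb : (m >>> k) &&& 1 = 1
    · exact ⟨k, by omega, hb⟩
    · have hsh : m >>> k = m / 2 ^ k := Nat.shiftRight_eq_div_pow m k
      have hand : (m >>> k) &&& 1 = (m >>> k) % 2 := Nat.and_one_is_mod _
      have h2 : 0 < 2 ^ k := by positivity
      have hdiv : m / 2 ^ k < 2 := by
        rw [Nat.div_lt_iff_lt_mul h2]
        rw [Nat.pow_succ] at hlt; omega
      have hmod : m / 2 ^ k % 2 = m / 2 ^ k := Nat.mod_eq_of_lt hdiv
      have hz : m / 2 ^ k = 0 := by rw [hand, hsh] at hb; omega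
      have hm : m < 2 ^ k := Nat.lt_of_div_eq_zero h2 hz
      obtain ⟨j, hj, hbit⟩ := ih m h0 hm
      exact ⟨j, by omega, hbit⟩

theorem star_fold (m : Nat) (ps : List Int) :
    ∀ (l : List Nat) (cs : List Char),
      ('*' ∈ cs ∨ ∃ j ∈ l, (m >>> j) &&& 1 = 1 ∧ (ps.getD j 0).toNat < cs.length) →
      '*' ∈ l.foldl (fun cs j => if (m >>> j) &&& 1 = 1 then cs.set (ps.getD j 0).toNat '*' else cs) cs := by
  intro l
  induction l with
  | nil =>
    intro cs h
    simp only [List.foldl_nil]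
    rcases h with h | ⟨j, hj, _⟩
    · exact h
    · simp at hj
  | cons j t ih =>
    intro cs h
    simp only [List.foldl_cons]
    rcases h with h | ⟨j', hj', hbit, hlen⟩
    · apply ih
      left
      split
      · exact star_mem_set h _
      · exact h
    · rcases List.mem_cons.1 hj' with rfl | hmem
      · apply ih
        left
        rw [if_pos hbit]
        exact mem_set_self hlen '*'
      · apply ih
        right
        refine ⟨j', hmem, hbit, ?_⟩
        split
        · simpa using hlen
        · exact hlen

theorem star_mem_gfaStamp (s : List Char) (ps : List Int) (m : Nat)
    (hps : ∀ p ∈ ps, 0 ≤ p ∧ p.toNat < s.length) (hm : m ≠ 0) (hlt : m < 2 ^ ps.length) :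
    '*' ∈ gfaStamp s ps m := by
  obtain ⟨j, hj, hbit⟩ := exists_bit ps.length m hm hlt
  apply star_fold
  right
  refine ⟨j, List.mem_range.2 hj, hbit, ?_⟩
  have hjl : j < ps.length := hj
  have hmem : ps.getD j 0 ∈ ps := by
    rw [List.getD_eq_getElem _ _ hjl]
    exact List.getElem_mem hjl
  exact (hps _ hmem).2

theorem gfStamp_eq_set (p : Int) (cs : List Char) (h0 : 0 ≤ p) (hl : p.toNat < cs.length) :
    gfStamp p cs = cs.set p.toNat '*' := by
  unfold gfStamp
  rw [PySem.List.slice_to _ h0, PySem.List.slice_from _ (by omega)]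
  rw [List.set_eq_take_cons_drop _ hl]
  have : (p + 1).toNat = p.toNat + 1 := by omega
  rw [this]

theorem doubling (s : List Char) (ps : List Int)
    (hps : ∀ p ∈ ps, 0 ≤ p ∧ p.toNat < s.length) :
    ps.foldl (fun combos p => combos ++ combos.map (gfStamp p)) [s]
      = (List.range (2 ^ ps.length)).map (gfaStamp s ps) := by
  induction ps using List.reverseRecOn with
  | nil => simp [gfaStamp]
  | append_singleton qs p ih =>
    have hqs : ∀ q ∈ qs, 0 ≤ q ∧ q.toNat < s.length := fun q hq => hps q (by simp [hq])
    have hp : 0 ≤ p ∧ p.toNat < s.length := hps p (by simp)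
    rw [List.foldl_append, List.foldl_cons, List.foldl_nil, ih hqs]
    have hpow : 2 ^ (qs ++ [p]).length = 2 ^ qs.length + 2 ^ qs.length := by
      simp [List.length_append, Nat.pow_succ]; ring
    rw [hpow, List.range_add, List.map_append, List.map_map]
    congr 1
    · -- low masks: bit qs.length is 0
      apply List.map_congr_left
      intro m hm
      have hmlt : m < 2 ^ qs.length := List.mem_range.1 hm
      rw [gfaStamp_append]
      rw [if_neg ?_]
      have : m >>> qs.length = 0 := by
        rw [Nat.shiftRight_eq_div_pow]
        exact Nat.div_eq_of_lt hmlt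
      simp [this]
    · -- high masks: bit qs.length is 1, lower bits as in m
      rw [List.map_map]
      apply List.map_congr_left
      intro m hm
      have hmlt : m < 2 ^ qs.length := List.mem_range.1 hm
      simp only [Function.comp_apply]
      rw [gfaStamp_append]
      have hbit : ((2 ^ qs.length + m) >>> qs.length) &&& 1 = 1 := by
        rw [Nat.and_one_is_mod, Nat.shiftRight_eq_div_pow]
        have h2 : 0 < 2 ^ qs.length := by positivity
        have : (2 ^ qs.length + m) / 2 ^ qs.length = m / 2 ^ qs.length + 1 := by
          rw [Nat.add_comm, Nat.add_div_right _ h2]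
        rw [this, Nat.div_eq_of_lt hmlt]
      rw [if_pos hbit]
      have hlow : gfaStamp s qs (2 ^ qs.length + m) = gfaStamp s qs m := by
        apply gfaStamp_congr_bits
        intro i hi
        rw [Nat.and_one_is_mod, Nat.and_one_is_mod, Nat.shiftRight_eq_div_pow,
          Nat.shiftRight_eq_div_pow]
        have h2i : 0 < 2 ^ i := by positivity
        have hL : 2 ^ i * (2 * 2 ^ (qs.length - 1 - i)) = 2 ^ qs.length := by
          have h1 : (2 : ℕ) * 2 ^ (qs.length - 1 - i) = 2 ^ (qs.length - i) := by
            rw [← pow_succ']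
            congr 1
            omega
          rw [h1, ← pow_add]
          congr 1
          omega
        rw [← hL, Nat.mul_add_div h2i]
        omega
      rw [hlow]
      rw [gfStamp_eq_set p (gfaStamp s qs m) hp.1 (by rw [gfaStamp_length]; exact hp.2)]

theorem gfObserved_go (s : List Char) (h : ∀ c ∈ s, c ∈ pvDigits) :
    ∀ (a0 a1 a2 a3 a4 a5 a6 a7 a8 a9 : Int),
    s.foldl (fun obs c => obs.bind fun o =>
        (PySem.Int.ofChars? [c]).map fun d => o.set d.toNat (o.getD d.toNat 0 + 1))
      (some [a0, a1, a2, a3, a4, a5, a6, a7, a8, a9])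
    = some [a0 + s.count '0', a1 + s.count '1', a2 + s.count '2', a3 + s.count '3',
        a4 + s.count '4', a5 + s.count '5', a6 + s.count '6', a7 + s.count '7',
        a8 + s.count '8', a9 + s.count '9'] := by
  induction s with
  | nil => intros; simp
  | cons c t ih =>
    intro a0 a1 a2 a3 a4 a5 a6 a7 a8 a9
    have hc : c ∈ pvDigits := h c (List.mem_cons_self)
    have ht : ∀ c ∈ t, c ∈ pvDigits := fun x hx => h x (List.mem_cons_of_mem _ hx)
    simp only [List.foldl_cons]
    fin_cases hc
    · rw [show ((some [a0, a1, a2, a3, a4, a5, a6, a7, a8, a9]).bind fun o =>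
            Option.map (fun d => o.set d.toNat (o.getD d.toNat 0 + 1)) (PySem.Int.ofChars? ['0']))
          = some [a0 + 1, a1, a2, a3, a4, a5, a6, a7, a8, a9] from by
        simp only [Option.bind_some]
        rw [show PySem.Int.ofChars? ['0'] = some 0 from by decide]
        rfl]
      rw [ih ht]
      simp
      omega
    · rw [show ((some [a0, a1, a2, a3, a4, a5, a6, a7, a8, a9]).bind fun o =>
            Option.map (fun d => o.set d.toNat (o.getD d.toNat 0 + 1)) (PySem.Int.ofChars? ['1']))
          = some [a0, a1 + 1, a2, a3, a4, a5, a6, a7, a8, a9] from by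
        simp only [Option.bind_some]
        rw [show PySem.Int.ofChars? ['1'] = some 1 from by decide]
        rfl]
      rw [ih ht]
      simp
      omega
    · rw [show ((some [a0, a1, a2, a3, a4, a5, a6, a7, a8, a9]).bind fun o =>
            Option.map (fun d => o.set d.toNat (o.getD d.toNat 0 + 1)) (PySem.Int.ofChars? ['2']))
          = some [a0, a1, a2 + 1, a3, a4, a5, a6, a7, a8, a9] from by
        simp only [Option.bind_some]
        rw [show PySem.Int.ofChars? ['2'] = some 2 from by decide]
        rfl]
      rw [ih ht]
      simp
      omega
    · rw [show ((some [a0, a1, a2, a3, a4, a5, a6, a7, a8, a9]).bind fun o =>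
            Option.map (fun d => o.set d.toNat (o.getD d.toNat 0 + 1)) (PySem.Int.ofChars? ['3']))
          = some [a0, a1, a2, a3 + 1, a4, a5, a6, a7, a8, a9] from by
        simp only [Option.bind_some]
        rw [show PySem.Int.ofChars? ['3'] = some 3 from by decide]
        rfl]
      rw [ih ht]
      simp
      omega
    · rw [show ((some [a0, a1, a2, a3, a4, a5, a6, a7, a8, a9]).bind fun o =>
            Option.map (fun d => o.set d.toNat (o.getD d.toNat 0 + 1)) (PySem.Int.ofChars? ['4']))
          = some [a0, a1, a2, a3, a4 + 1, a5, a6, a7, a8, a9] from by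
        simp only [Option.bind_some]
        rw [show PySem.Int.ofChars? ['4'] = some 4 from by decide]
        rfl]
      rw [ih ht]
      simp
      omega
    · rw [show ((some [a0, a1, a2, a3, a4, a5, a6, a7, a8, a9]).bind fun o =>
            Option.map (fun d => o.set d.toNat (o.getD d.toNat 0 + 1)) (PySem.Int.ofChars? ['5']))
          = some [a0, a1, a2, a3, a4, a5 + 1, a6, a7, a8, a9] from by
        simp only [Option.bind_some]
        rw [show PySem.Int.ofChars? ['5'] = some 5 from by decide]
        rfl]
      rw [ih ht]
      simp
      omega
    · rw [show ((some [a0, a1, a2, a3, a4, a5, a6, a7, a8, a9]).bind fun o =>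
            Option.map (fun d => o.set d.toNat (o.getD d.toNat 0 + 1)) (PySem.Int.ofChars? ['6']))
          = some [a0, a1, a2, a3, a4, a5, a6 + 1, a7, a8, a9] from by
        simp only [Option.bind_some]
        rw [show PySem.Int.ofChars? ['6'] = some 6 from by decide]
        rfl]
      rw [ih ht]
      simp
      omega
    · rw [show ((some [a0, a1, a2, a3, a4, a5, a6, a7, a8, a9]).bind fun o =>
            Option.map (fun d => o.set d.toNat (o.getD d.toNat 0 + 1)) (PySem.Int.ofChars? ['7']))
          = some [a0, a1, a2, a3, a4, a5, a6, a7 + 1, a8, a9] from by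
        simp only [Option.bind_some]
        rw [show PySem.Int.ofChars? ['7'] = some 7 from by decide]
        rfl]
      rw [ih ht]
      simp
      omega
    · rw [show ((some [a0, a1, a2, a3, a4, a5, a6, a7, a8, a9]).bind fun o =>
            Option.map (fun d => o.set d.toNat (o.getD d.toNat 0 + 1)) (PySem.Int.ofChars? ['8']))
          = some [a0, a1, a2, a3, a4, a5, a6, a7, a8 + 1, a9] from by
        simp only [Option.bind_some]
        rw [show PySem.Int.ofChars? ['8'] = some 8 from by decide]
        rfl]
      rw [ih ht]
      simp
      omega
    · rw [show ((some [a0, a1, a2, a3, a4, a5, a6, a7, a8, a9]).bind fun o =>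
            Option.map (fun d => o.set d.toNat (o.getD d.toNat 0 + 1)) (PySem.Int.ofChars? ['9']))
          = some [a0, a1, a2, a3, a4, a5, a6, a7, a8, a9 + 1] from by
        simp only [Option.bind_some]
        rw [show PySem.Int.ofChars? ['9'] = some 9 from by decide]
        rfl]
      rw [ih ht]
      simp
      omega

theorem gfObserved_digits (s : List Char) (h : ∀ c ∈ s, c ∈ pvDigits) :
    gfObserved s = some [(s.count '0' : Int), (s.count '1' : Int), (s.count '2' : Int),
      (s.count '3' : Int), (s.count '4' : Int), (s.count '5' : Int), (s.count '6' : Int),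
      (s.count '7' : Int), (s.count '8' : Int), (s.count '9' : Int)] := by
  unfold gfObserved
  rw [gfObserved_go s h]
  norm_num

theorem isIn_singleton (a : Char) (l : List Char) :
    PySem.Chars.isIn [a] l = decide (a ∈ l) := by
  by_cases h : a ∈ l
  · simp only [h, decide_true]
    rw [PySem.Chars.isIn_iff_infix, List.singleton_infix_iff]
    exact h
  · simp only [h, decide_false]
    rw [PySem.Chars.isIn_eq_false_iff, List.singleton_infix_iff]
    exact h

theorem toDigitsCore_digits :
    ∀ (fuel n : Nat) (ds : List Char), (∀ c ∈ ds, c ∈ pvDigits) →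
      ∀ c ∈ Nat.toDigitsCore 10 fuel n ds, c ∈ pvDigits := by
  intro fuel
  induction fuel with
  | zero => intro n ds hds; simpa [Nat.toDigitsCore] using hds
  | succ f ih =>
    intro n ds hds
    have hdd : (n % 10).digitChar ∈ pvDigits := by
      have h10 : n % 10 < 10 := Nat.mod_lt n (by omega)
      interval_cases h : n % 10 <;> decide
    simp only [Nat.toDigitsCore]
    split
    · intro c hc
      rcases List.mem_cons.1 hc with rfl | hc
      · exact hdd
      · exact hds c hc
    · exact ih (n / 10) _ (fun c hc => by
        rcases List.mem_cons.1 hc with rfl | hc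
        · exact hdd
        · exact hds c hc)

theorem toChars_digits (n : Int) (h : 0 ≤ n) : ∀ c ∈ PySem.Int.toChars n, c ∈ pvDigits := by
  unfold PySem.Int.toChars
  rw [if_neg (by omega)]
  unfold Nat.toDigits
  exact toDigitsCore_digits _ _ [] (by simp)

theorem gfaStep_eq (s : List Char) (fams : List String) (d : Char) :
    gfaStep s fams d = fams ++ (List.range' 1 (2 ^ (posnsFrom s d 0).length - 1)).map
      (fun mask => String.ofList (gfaStamp s (posnsFrom s d 0) mask)) := rfl

theorem step_eq (s : List Char) (hstar : '*' ∉ s) (digit : Int) (dc : Char)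
    (hd : PySem.Int.toChars digit = [dc]) (fams : List String) :
    gfStep s fams (digit, (s.count dc : Int)) = gfaStep s fams dc := by
  have hps := posnsFrom_bounds s dc 0
  have hlen := posnsFrom_length s dc 0
  have hvalid : ∀ p ∈ posnsFrom s dc 0, 0 ≤ p ∧ p.toNat < s.length := by
    intro p hp
    have := hps p hp
    omega
  rcases Nat.lt_or_ge (s.count dc) 2 with hc2 | hc2
  · rcases Nat.lt_or_ge (s.count dc) 1 with hc0 | hc1
    · -- count 0: both sides add nothing
      have h0 : s.count dc = 0 := by omega
      have hk : (posnsFrom s dc 0).length = 0 := by rw [hlen, h0]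
      unfold gfStep
      rw [gfaStep_eq, if_neg (by simp [h0]), if_neg (by simp [h0])]
      rw [show posnsFrom s dc 0 = [] from List.eq_nil_of_length_eq_zero hk]
      simp
    · -- count 1: replace branch vs single mask
      have h1 : s.count dc = 1 := by omega
      obtain ⟨p, hp⟩ : ∃ p, posnsFrom s dc 0 = [p] := by
        have hk : (posnsFrom s dc 0).length = 1 := by rw [hlen, h1]
        cases hps' : posnsFrom s dc 0 with
        | nil => rw [hps'] at hk; simp at hk
        | cons a t =>
          rw [hps'] at hk
          simp at hk
          exact ⟨a, by rw [hk]⟩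
      have hpv := hvalid p (by rw [hp]; simp)
      unfold gfStep
      rw [gfaStep_eq, if_pos (by simp [h1])]
      show fams ++ _ = fams ++ _
      congr 1
      rw [hd, replace_single, map_eq_set_of_posns_single s dc 0 p hp, hp]
      norm_num
      have hstamp : gfaStamp s [p] 1 = s.set p.toNat '*' := by
        unfold gfaStamp
        simp [List.range_succ]
      rw [hstamp]
  · -- count ≥ 2: doubling branch
    unfold gfStep
    rw [gfaStep_eq, if_neg (by omega),
      if_pos (by show (s.count dc : Int) > 1; exact_mod_cast hc2)]
    show fams ++ _ = fams ++ _
    congr 1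
    have hfun : (fun (combos : List (List Char)) (io : Int × Char) =>
        if [io.2] = PySem.Int.toChars digit then combos ++ combos.map (gfStamp io.1) else combos)
      = (fun combos (io : Int × Char) =>
        if io.2 == dc then combos ++ combos.map (gfStamp io.1) else combos) := by
      funext combos io
      rw [hd]
      by_cases h : io.2 = dc
      · rw [if_pos (by rw [h]), if_pos (by simp [h])]
      · rw [if_neg (by simpa using h), if_neg (by simp [h])]
    rw [hfun]
    rw [foldl_filter_map (fun (ic : Int × Char) => ic.2 == dc) (fun (ic : Int × Char) => ic.1)
      (fun (combos : List (List Char)) (i : Int) => combos ++ combos.map (gfStamp i))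
      (PySem.List.enumerate s 0) [s]]
    rw [show (((PySem.List.enumerate s 0).filter (fun ic => ic.2 == dc)).map (·.1))
      = posnsFrom s dc 0 from rfl]
    rw [doubling s _ hvalid]
    have hfilt : (fun (combo : List Char) => PySem.Chars.isIn ['*'] combo)
        = fun combo => decide ('*' ∈ combo) := by
      funext combo; exact isIn_singleton '*' combo
    rw [hfilt, hlen]
    rw [show 2 ^ s.count dc = (2 ^ s.count dc - 1) + 1 by
      have : 0 < 2 ^ s.count dc := by positivity
      omega]
    rw [List.range_eq_range', List.range'_succ, List.map_cons, List.filter_cons]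
    rw [gfaStamp_zero]
    rw [if_neg (by simpa using hstar)]
    rw [List.filter_map, List.filter_eq_self.2 ?side, List.map_map]
    case side =>
      intro m hm
      have hmr : 1 ≤ m ∧ m < 1 + (2 ^ s.count dc - 1) := List.mem_range'_1.1 hm
      simp only [Function.comp_apply, decide_eq_true_eq]
      apply star_mem_gfaStamp s _ m hvalid (by omega)
      rw [hlen]; omega
    rfl

-- ===== VERDICT (by name: the statement is the Claim_ definition above) =====
theorem generate_families_spec : Claim_equal_generate_families := by
  intro n _ hpre
  unfold Spec_generate_families generate_families generate_families_alt
  have hdig : ∀ c ∈ PySem.Int.toChars n, c ∈ pvDigits := toChars_digits n hpre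
  have hstar : '*' ∉ PySem.Int.toChars n := fun hm => by
    have h1 := hdig '*' hm
    have h2 : '*' ∉ pvDigits := by decide
    exact h2 h1
  simp only []
  rw [gfObserved_digits _ hdig]
  simp only [List.foldl_cons, List.foldl_nil, PySem.List.enumerate_cons]
  norm_num
  rw [step_eq _ hstar 0 '0' (by decide), step_eq _ hstar 1 '1' (by decide),
    step_eq _ hstar 2 '2' (by decide), step_eq _ hstar 3 '3' (by decide),
    step_eq _ hstar 4 '4' (by decide), step_eq _ hstar 5 '5' (by decide),
    step_eq _ hstar 6 '6' (by decide), step_eq _ hstar 7 '7' (by decide),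
    step_eq _ hstar 8 '8' (by decide), step_eq _ hstar 9 '9' (by decide)]
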